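-- pv_equiv track=rewrite | github.com/tandav/musiclib | src/musiclib/util/etc.py | increment_duplicates
-- ===== SOURCE A (Python) =====
-- def increment_duplicates(a: list[int]) -> list[int]:
--     if not a:
--         return []
--     res = [a[0]]
--     for num in a[1:]:
--         if num <= res[-1]:
--             res.append(res[-1] + 1)
--         else:
--             res.append(num)
--     return res
-- ===== SOURCE B (Python) =====
-- def increment_duplicates(a: list[int]) -> list[int]:
--     if not a:
--         return []
--     b = [x - i for i, x in enumerate(a)]
--     pm = []
--     m = b[0]
--     for x in b:
--         if x > m:
--             m = x
--         pm.append(m)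
--     return [i + m for i, m in enumerate(pm)]
-- ===== Notes on version B (the rewrite author's own statement) =====
-- stated objective: alternative
-- what changed: Replaces the greedy compare-to-previous-result branch with the closed identity res[i] = i + max_{j<=i}(a[j]-j): a transform pass b[j]=a[j]-j, a running-max pass, and an index-add comprehension.
import Mathlib
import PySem

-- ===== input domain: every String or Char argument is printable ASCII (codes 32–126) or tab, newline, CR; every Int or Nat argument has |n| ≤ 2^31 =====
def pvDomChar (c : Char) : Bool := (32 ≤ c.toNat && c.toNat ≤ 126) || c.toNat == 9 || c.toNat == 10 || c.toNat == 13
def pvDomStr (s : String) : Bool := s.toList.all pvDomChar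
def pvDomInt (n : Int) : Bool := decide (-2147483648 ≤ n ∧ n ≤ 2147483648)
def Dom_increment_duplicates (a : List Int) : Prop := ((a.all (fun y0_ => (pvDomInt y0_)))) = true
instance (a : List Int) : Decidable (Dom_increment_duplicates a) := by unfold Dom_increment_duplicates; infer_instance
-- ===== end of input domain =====

-- B replaces A's greedy compare-to-previous branch with the identity res[i] = i + max_{j<=i}(a[j]-j)
-- (transform pass, running-max pass, index-add pass); same O(n) cost, different decomposition.

-- ===== PORT A =====
def increment_duplicates (a : List Int) : List Int :=
  match a with
  | [] => []
  | h :: t =>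
    t.foldl (fun res num =>
      if num ≤ res.getLast! then res ++ [res.getLast! + 1] else res ++ [num]) [h]

-- ===== PORT B =====
def increment_duplicates_alt (a : List Int) : List Int :=
  match a with
  | [] => []
  | _ :: _ =>
    let b := a.zipIdx.map (fun p => p.1 - (p.2 : Int))
    let pm := (b.foldl (fun s x =>
        let m := if x > s.2 then x else s.2
        (s.1 ++ [m], m)) (([] : List Int), b.headD 0)).1
    pm.zipIdx.map (fun p => (p.2 : Int) + p.1)

-- ===== PRECONDITION & SPEC =====
def Spec_increment_duplicates (a : List Int) (out : List Int) : Prop := out = increment_duplicates_alt a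
instance (a : List Int) (out : List Int) : Decidable (Spec_increment_duplicates a out) := by unfold Spec_increment_duplicates; infer_instance

-- ===== CLAIM (what is proved, stated in full; the proofs are below) =====
def Claim_equal_increment_duplicates : Prop := ∀ (a : List Int), Dom_increment_duplicates a → Spec_increment_duplicates a (increment_duplicates a)

-- ===== LEMMAS AND PROOFS =====

/-- Recursive characterisation of A's loop body chain. -/
def pvGA (prev : Int) : List Int → List Int
  | [] => []
  | n :: t =>
    let v := if n ≤ prev then prev + 1 else n
    v :: pvGA v t

/-- Recursive characterisation of B's running-max pass. -/
def pvPM (m : Int) : List Int → List Int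
  | [] => []
  | x :: t =>
    let m' := if x > m then x else m
    m' :: pvPM m' t

theorem pvGetLast!_concat (l : List Int) (v : Int) : (l ++ [v]).getLast! = v := by
  simp

theorem pvA_fold (t : List Int) : ∀ (res : List Int), res ≠ [] →
    t.foldl (fun res num =>
      if num ≤ res.getLast! then res ++ [res.getLast! + 1] else res ++ [num]) res
    = res ++ pvGA res.getLast! t := by
  induction t with
  | nil => intro res _; simp [pvGA]
  | cons n t ih =>
    intro res hne
    simp only [List.foldl_cons, pvGA]
    by_cases h : n ≤ res.getLast!
    · rw [if_pos h, if_pos h, ih _ (by simp), pvGetLast!_concat, List.append_assoc]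
      rfl
    · rw [if_neg h, if_neg h, ih _ (by simp), pvGetLast!_concat, List.append_assoc]
      rfl

theorem pvB_fold (b : List Int) : ∀ (pm0 : List Int) (m : Int),
    (b.foldl (fun s x =>
        let m := if x > s.2 then x else s.2
        (s.1 ++ [m], m)) (pm0, m)).1 = pm0 ++ pvPM m b := by
  induction b with
  | nil => intro pm0 m; simp [pvPM]
  | cons x b ih =>
    intro pm0 m
    simp only [List.foldl_cons, pvPM]
    rw [ih, List.append_assoc]
    rfl

theorem pvMain (t : List Int) : ∀ (k : Nat) (m : Int),
    ((pvPM m ((t.zipIdx k).map (fun p => p.1 - (p.2 : Int)))).zipIdx k).map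
      (fun p => (p.2 : Int) + p.1)
    = pvGA (m + (k : Int) - 1) t := by
  induction t with
  | nil => intro k m; simp [pvPM, pvGA]
  | cons n t ih =>
    intro k m
    simp only [List.zipIdx_cons, List.map_cons, pvPM, pvGA]
    have hval : ((k : Int) + (if n - (k : Int) > m then n - (k : Int) else m))
        = (if n ≤ m + (k : Int) - 1 then m + (k : Int) - 1 + 1 else n) := by
      split_ifs <;> omega
    have hnext : (if n - (k : Int) > m then n - (k : Int) else m) + ((k : Int) + 1) - 1
        = (if n ≤ m + (k : Int) - 1 then m + (k : Int) - 1 + 1 else n) := by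
      split_ifs <;> omega
    rw [hval]
    congr 1
    rw [ih (k + 1) _]
    push_cast
    rw [hnext]

-- ===== VERDICT (by name: the statement is the Claim_ definition above) =====
theorem increment_duplicates_spec : Claim_equal_increment_duplicates := by
  intro a _
  show increment_duplicates a = increment_duplicates_alt a
  cases a with
  | nil => rfl
  | cons h t =>
    have hL : [h].getLast! = h := rfl
    have hA : increment_duplicates (h :: t) = [h] ++ pvGA h t := by
      show List.foldl _ _ t = _
      rw [pvA_fold t [h] (by simp), hL]
    rw [hA]
    simp only [increment_duplicates_alt, List.zipIdx_cons, List.map_cons, List.headD_cons,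
      pvB_fold, pvPM, ite_self, pvMain, Nat.cast_zero, Nat.cast_one, sub_zero, zero_add,
      add_sub_cancel_right, List.nil_append, List.singleton_append]
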